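-- pv_equiv track=rewrite | github.com/bader-daniel/ios_cdp_discovery | functions.py | get_access_ports
-- ===== SOURCE A (Python) =====
-- def get_access_ports(temp_access_ports, trunks):
--     access_ports = []
--     for row in temp_access_ports.split('\n'):
--         temp = ''
--         if not row:
--             continue
--         for i in row:
--             if i == ' ':
--                 break
--             temp += i
--         if temp in trunks or temp in access_ports:
--             continue
--         access_ports.append(temp)
--
--     return access_ports
-- ===== SOURCE B (Python) =====
-- def get_access_ports(temp_access_ports, trunks):
--     tokens = [row.split(' ', 1)[0] for row in temp_access_ports.split('\n') if row]
--     access_ports = []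
--     seen = set()
--     for tok in tokens:
--         if tok not in trunks and tok not in seen:
--             seen.add(tok)
--             access_ports.append(tok)
--     return access_ports
-- ===== Notes on version B (the rewrite author's own statement) =====
-- stated objective: simpler
-- what changed: A interleaves a hand-rolled character loop (break at ' ') with dedup against the growing result list inside one pass; B first extracts all first tokens with row.split(' ', 1)[0] in a comprehension, then dedups in a separate pass using a seen set instead of scanning the result list.
import Mathlib
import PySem

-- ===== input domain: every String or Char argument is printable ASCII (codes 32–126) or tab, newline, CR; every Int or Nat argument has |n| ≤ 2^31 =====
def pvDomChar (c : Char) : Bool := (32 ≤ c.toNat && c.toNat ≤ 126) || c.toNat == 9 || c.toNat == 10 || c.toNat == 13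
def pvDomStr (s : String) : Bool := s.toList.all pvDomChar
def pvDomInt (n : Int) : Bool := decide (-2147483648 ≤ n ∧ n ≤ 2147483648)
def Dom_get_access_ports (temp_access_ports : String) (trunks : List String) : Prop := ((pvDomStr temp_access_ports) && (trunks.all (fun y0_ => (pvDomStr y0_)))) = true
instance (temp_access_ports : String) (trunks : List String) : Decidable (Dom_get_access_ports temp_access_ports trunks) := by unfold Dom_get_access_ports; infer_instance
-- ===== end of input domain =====

-- B (port below) restructures A into two passes — extract all first tokens with split(' ',1)[0],
-- then dedup with a seen set in a second pass — same return value everywhere (objective: simpler decomposition).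

-- ===== PORT A =====
-- A's inner character loop: accumulate chars of `row` into `temp`, break at the first ' '.
def pvFirstA (cs : List Char) (temp : List Char) : List Char :=
  match cs with
  | [] => temp
  | c :: rest => if c = ' ' then temp else pvFirstA rest (temp ++ [c])

def get_access_ports (temp_access_ports : String) (trunks : List String) : List String :=
  ((PySem.Str.split? temp_access_ports "\n").getD []).foldl
    (fun acc row =>
      if row = "" then acc
      else
        let temp := String.ofList (pvFirstA row.toList [])
        if trunks.contains temp || acc.contains temp then acc
        else acc ++ [temp]) []

-- ===== PORT B =====
-- row.split(' ', 1)[0]  (split always returns a non-empty list, so [0] is total)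
def pvFirstTok (row : String) : String :=
  (((PySem.Str.splitMax? row " " 1).getD []).headD "")

def get_access_ports_alt (temp_access_ports : String) (trunks : List String) : List String :=
  let tokens := (((PySem.Str.split? temp_access_ports "\n").getD []).filter
                   (fun row => row ≠ "")).map pvFirstTok
  (tokens.foldl
    (fun (st : List String × PySem.Set String) tok =>
      if !trunks.contains tok && !PySem.Set.contains st.2 tok then
        (st.1 ++ [tok], PySem.Set.add st.2 tok)
      else st)
    ([], PySem.Set.empty)).1

-- ===== PRECONDITION & SPEC =====
def Spec_get_access_ports (temp_access_ports : String) (trunks : List String) (out : List String) : Prop := out = get_access_ports_alt temp_access_ports trunks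
instance (temp_access_ports : String) (trunks : List String) (out : List String) : Decidable (Spec_get_access_ports temp_access_ports trunks out) := by unfold Spec_get_access_ports; infer_instance

-- ===== CLAIM (what is proved, stated in full; the proofs are below) =====
def Claim_equal_get_access_ports : Prop := ∀ (temp_access_ports : String) (trunks : List String), Dom_get_access_ports temp_access_ports trunks → Spec_get_access_ports temp_access_ports trunks (get_access_ports temp_access_ports trunks)

-- ===== LEMMAS AND PROOFS =====

-- A's character loop is takeWhile (≠ ' ') prefixed by the accumulator.
theorem pvFirstA_eq (cs temp : List Char) :
    pvFirstA cs temp = temp ++ cs.takeWhile (fun c => c ≠ ' ') := by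
  induction cs generalizing temp with
  | nil => simp [pvFirstA]
  | cons c rest ih =>
    by_cases h : c = ' '
    · simp [pvFirstA, h]
    · simp [pvFirstA, h, ih]

-- the m = 0 tail of splitOnMax.go keeps the already-collected piece `a` in front
theorem pv_go_zero (fuel : Nat) (l cur : List Char) (a : List Char) :
    ∃ x, PySem.Chars.splitOnMax.go [' '] fuel 0 l cur [a] = a :: x := by
  cases fuel with
  | zero => exact ⟨_, rfl⟩
  | succ fuel =>
    cases l with
    | nil => exact ⟨_, rfl⟩
    | cons c rest => exact ⟨_, rfl⟩

-- the first piece of row.split(' ', 1) is the chars before the first ' '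
theorem pv_go_one (fuel : Nat) (l cur : List Char) (h : l.length ≤ fuel) :
    ∃ x, PySem.Chars.splitOnMax.go [' '] fuel 1 l cur [] =
      (cur.reverse ++ l.takeWhile (fun c => c ≠ ' ')) :: x := by
  induction fuel generalizing l cur with
  | zero =>
    have hnil : l = [] := List.length_eq_zero_iff.mp (Nat.le_zero.mp h)
    subst hnil
    exact ⟨[], by simp [PySem.Chars.splitOnMax.go]⟩
  | succ fuel ih =>
    cases l with
    | nil => exact ⟨[], by simp [PySem.Chars.splitOnMax.go]⟩
    | cons c rest =>
      by_cases hc : c = ' '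
      · subst hc
        have hpre : [' '].isPrefixOf (' ' :: rest) = true := by
          simp [List.isPrefixOf]
        obtain ⟨x, hx⟩ := pv_go_zero fuel rest [] cur.reverse
        refine ⟨x, ?_⟩
        simp [PySem.Chars.splitOnMax.go, hpre, hx]
      · have hpre : [' '].isPrefixOf (c :: rest) = false := by
          simp [List.isPrefixOf]; exact fun h' => hc h'.symm
        obtain ⟨x, hx⟩ := ih rest (c :: cur) (by simpa using Nat.le_of_succ_le_succ h)
        refine ⟨x, ?_⟩
        rw [show PySem.Chars.splitOnMax.go [' '] (fuel+1) 1 (c :: rest) cur [] =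
              PySem.Chars.splitOnMax.go [' '] fuel 1 rest (c :: cur) [] by
            simp [PySem.Chars.splitOnMax.go, hpre]]
        rw [hx]
        simp [hc]

-- B's token extraction equals A's character loop
theorem pvFirstTok_eq (row : String) :
    pvFirstTok row = String.ofList (pvFirstA row.toList []) := by
  obtain ⟨x, hx⟩ := pv_go_one (row.length + 1) row.toList []
    (by simp)
  simp [pvFirstTok, PySem.Str.splitMax?, PySem.Chars.splitMax?,
        PySem.Chars.splitOnMax, hx, pvFirstA_eq]

-- B's fold with a seen set equals the direct dedup fold, when seen = result
theorem pvBfold_eq (trunks : List String) (tokens : List String) (res : List String) :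
    (tokens.foldl
      (fun (st : List String × PySem.Set String) tok =>
        if !trunks.contains tok && !PySem.Set.contains st.2 tok then
          (st.1 ++ [tok], PySem.Set.add st.2 tok)
        else st)
      (res, res)).1 =
    tokens.foldl
      (fun acc tok => if trunks.contains tok || acc.contains tok then acc else acc ++ [tok])
      res := by
  induction tokens generalizing res with
  | nil => rfl
  | cons tok rest ih =>
    by_cases hb : (trunks.contains tok || res.contains tok) = true
    · have h' : (!trunks.contains tok && !List.contains res tok) = false := by
        rw [← Bool.not_or, hb]; rfl
      rw [List.foldl_cons, List.foldl_cons,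
          if_neg (by rw [show (!trunks.contains tok && !PySem.Set.contains res tok) =
            (!trunks.contains tok && !List.contains res tok) from rfl, h']; simp),
          if_pos hb]
      exact ih res
    · have hb' : (trunks.contains tok || res.contains tok) = false := Bool.eq_false_iff.mpr hb
      have h' : (!trunks.contains tok && !List.contains res tok) = true := by
        rw [← Bool.not_or, hb']; rfl
      have hcf : List.contains res tok = false := (Bool.or_eq_false_iff.mp hb').2
      have hadd : PySem.Set.add (res : PySem.Set String) tok = res ++ [tok] := by
        simp only [PySem.Set.add, PySem.Set.contains]
        rw [if_neg (by rw [hcf]; simp)]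
      rw [List.foldl_cons, List.foldl_cons,
          if_pos (show (!trunks.contains tok && !PySem.Set.contains res tok) = true from h'),
          if_neg hb]
      simp only [hadd]
      exact ih (res ++ [tok])

-- interleaved extract+dedup over the lines equals extract-then-dedup
theorem pvRows_eq (trunks : List String) (rows : List String) (acc : List String) :
    rows.foldl
      (fun acc row =>
        if row = "" then acc
        else
          let temp := String.ofList (pvFirstA row.toList [])
          if trunks.contains temp || acc.contains temp then acc
          else acc ++ [temp]) acc =
    ((rows.filter (fun row => row ≠ "")).map pvFirstTok).foldl
      (fun acc tok => if trunks.contains tok || acc.contains tok then acc else acc ++ [tok])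
      acc := by
  induction rows generalizing acc with
  | nil => rfl
  | cons row rest ih =>
    by_cases h : row = ""
    · rw [List.foldl_cons, List.filter_cons_of_neg (by simp [h])]
      show rest.foldl _ (if row = "" then acc else _) = _
      rw [if_pos h]
      exact ih acc
    · rw [List.foldl_cons, List.filter_cons_of_pos (by simp [h]), List.map_cons,
          List.foldl_cons, pvFirstTok_eq]
      show rest.foldl _ (if row = "" then acc else _) = _
      rw [if_neg h]
      exact ih _

-- ===== VERDICT (by name: the statement is the Claim_ definition above) =====
theorem get_access_ports_spec : Claim_equal_get_access_ports := by
  intro s trunks _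
  unfold Spec_get_access_ports get_access_ports get_access_ports_alt
  rw [pvRows_eq, ← pvBfold_eq]
  rfl
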